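-- pv_equiv track=rewrite | github.com/vadim-strebulaev/Olimpiada | Olimp1/task5.py | getVoids
-- ===== SOURCE A (Python) =====
-- import collections
--
-- rect = collections.namedtuple('rect', 'x1 y1 x2 y2')
--
-- def getVoids(index, line):
--     result = []
--
--     length = len(line)
--     if length > 0:
--         for i, item in enumerate(line):
--             if item == '.':
--                 if len(result) > 0 and result[-1].x2 + 1 == i:
--                     result[-1] = rect(result[-1].x1, index, i, index)
--                 else:
--                     result.append(rect(i, index, i, index))
--
--     return result
-- ===== SOURCE B (Python) =====
-- import collections
--
-- rect = collections.namedtuple('rect', 'x1 y1 x2 y2')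
--
-- def getVoids(index, line):
--     # run-based scan: jump over each maximal run of '.' and emit one rect per run
--     result = []
--     i = 0
--     n = len(line)
--     while i < n:
--         if line[i] == '.':
--             j = i
--             while j < n and line[j] == '.':
--                 j += 1
--             result.append(rect(i, index, j - 1, index))
--             i = j
--         else:
--             i += 1
--     return result
-- ===== Notes on version B (the rewrite author's own statement) =====
-- stated objective: alternative
-- what changed: B scans the line run-by-run with a while loop that jumps over each maximal run of '.' and appends one rect per run, instead of A's per-character pass that appends a unit rect and then repeatedly rewrites result[-1] to merge adjacent dots.
import Mathlib
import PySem

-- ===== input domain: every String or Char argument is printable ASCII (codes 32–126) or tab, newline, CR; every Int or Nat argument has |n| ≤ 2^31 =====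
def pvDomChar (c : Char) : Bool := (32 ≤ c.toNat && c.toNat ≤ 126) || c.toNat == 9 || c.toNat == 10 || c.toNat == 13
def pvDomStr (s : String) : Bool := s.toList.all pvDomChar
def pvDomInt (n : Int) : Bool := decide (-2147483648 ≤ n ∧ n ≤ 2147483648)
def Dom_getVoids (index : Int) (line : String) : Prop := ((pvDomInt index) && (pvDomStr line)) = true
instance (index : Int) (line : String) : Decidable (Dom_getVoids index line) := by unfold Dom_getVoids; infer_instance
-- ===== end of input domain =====

-- B replaces A's per-character append-or-merge scan by a run-based scan that jumps over
-- each maximal run of '.' and emits one rect per run (objective: alternative decomposition).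

-- ===== PORT A =====
-- one iteration of A's for-loop body (state = result list; result[-1] read via getLast?)
def stepA (index : Int) (res : List (Int × Int × Int × Int)) (pc : Int × Char) :
    List (Int × Int × Int × Int) :=
  if pc.2 = '.' then
    match res.getLast? with
    | some r =>
        if r.2.2.1 + 1 = pc.1 then
          res.dropLast ++ [(r.1, index, pc.1, index)]
        else
          res ++ [(pc.1, index, pc.1, index)]
    | none => res ++ [(pc.1, index, pc.1, index)]
  else res

def getVoids (index : Int) (line : String) : List (Int × Int × Int × Int) :=
  let length := PySem.Str.len line
  if length > 0 then
    (PySem.List.enumerate line.toList 0).foldl (stepA index) []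
  else []

-- ===== PORT B =====
-- the inner `while j < n and line[j] == '.'` loop of Source B: number of leading dots
def countDots : List Char → Nat
  | [] => 0
  | c :: cs => if c = '.' then countDots cs + 1 else 0

-- the outer while-loop of Source B: position p, remaining characters cs
def altGo (index : Int) (p : Int) (cs : List Char) : List (Int × Int × Int × Int) :=
  match cs with
  | [] => []
  | c :: rest =>
      if c = '.' then
        let k := countDots rest
        (p, index, p + (k : Int), index) :: altGo index (p + (k : Int) + 1) (rest.drop k)
      else
        altGo index (p + 1) rest
termination_by cs.length
decreasing_by
  · exact Nat.lt_succ_of_le (by simp)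
  · simp

def getVoids_alt (index : Int) (line : String) : List (Int × Int × Int × Int) :=
  altGo index 0 line.toList

-- ===== PRECONDITION & SPEC =====
def Spec_getVoids (index : Int) (line : String) (out : List (Int × Int × Int × Int)) : Prop := out = getVoids_alt index line
instance (index : Int) (line : String) (out : List (Int × Int × Int × Int)) : Decidable (Spec_getVoids index line out) := by unfold Spec_getVoids; infer_instance

-- ===== CLAIM (what is proved, stated in full; the proofs are below) =====
def Claim_equal_getVoids : Prop := ∀ (index : Int) (line : String), Dom_getVoids index line → Spec_getVoids index line (getVoids index line)

-- ===== LEMMAS AND PROOFS =====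

-- the leading dots of a list are a replicate of '.'
theorem countDots_take (cs : List Char) :
    cs.take (countDots cs) = List.replicate (countDots cs) '.' := by
  induction cs with
  | nil => simp [countDots]
  | cons c rest ih =>
      by_cases h : c = '.'
      · simp [countDots, h, List.replicate_succ, ih]
      · simp [countDots, h]

-- the first character after the leading dots is not a dot
theorem countDots_drop_head (cs : List Char) (c : Char) (rest : List Char)
    (h : cs.drop (countDots cs) = c :: rest) : c ≠ '.' := by
  induction cs generalizing c rest with
  | nil => simp [countDots] at h
  | cons c' rest' ih =>
      by_cases hc : c' = '.'
      · simp [countDots, hc] at h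
        exact ih _ _ h
      · simp [countDots, hc] at h
        rw [← h.1]; exact hc

-- k further dots merge into the last (open) rect one by one, extending its x2 by k
theorem extendRun (index : Int) :
    ∀ (k : Nat) (res : List (Int × Int × Int × Int)) (x1 p : Int) (cs : List Char),
      (PySem.List.enumerate (List.replicate k '.' ++ cs) (p + 1)).foldl (stepA index)
          (res ++ [(x1, index, p, index)])
        = (PySem.List.enumerate cs (p + 1 + (k : Int))).foldl (stepA index)
            (res ++ [(x1, index, p + (k : Int), index)]) := by
  intro k
  induction k with
  | zero => intro res x1 p cs; simp
  | succ k ih =>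
      intro res x1 p cs
      rw [List.replicate_succ, List.cons_append, PySem.List.enumerate_cons, List.foldl_cons]
      rw [show stepA index (res ++ [(x1, index, p, index)]) (p + 1, '.')
            = res ++ [(x1, index, p + 1, index)] by simp [stepA]]
      rw [ih res x1 (p + 1) cs]
      have h1 : (p : Int) + 1 + 1 + (k : Int) = p + 1 + ((k : Nat) + 1 : Nat) := by push_cast; ring
      have h2 : (p : Int) + 1 + (k : Int) = p + ((k : Nat) + 1 : Nat) := by push_cast; ring
      rw [h1, h2]

-- main invariant: if the last accumulated rect (if any) ended strictly before p - 1,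
-- A's fold from position p equals res ++ B's run-based scan from position p
theorem mainLemma (index : Int) :
    ∀ (n : Nat) (cs : List Char), cs.length ≤ n →
      ∀ (p : Int) (res : List (Int × Int × Int × Int)),
        (∀ r, res.getLast? = some r → r.2.2.1 + 1 < p) →
        (PySem.List.enumerate cs p).foldl (stepA index) res
          = res ++ altGo index p cs := by
  intro n
  induction n with
  | zero =>
      intro cs hcs p res _
      have : cs = [] := List.length_eq_zero_iff.mp (Nat.le_zero.mp hcs)
      subst this; simp [altGo]
  | succ n ih =>
      intro cs hcs p res hinv
      cases cs with
      | nil => simp [altGo]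
      | cons c rest =>
          rw [PySem.List.enumerate_cons, List.foldl_cons]
          by_cases hc : c = '.'
          · subst hc
            have hstep : stepA index res (p, '.') = res ++ [(p, index, p, index)] := by
              rcases hres : res.getLast? with _ | r
              · simp [stepA, hres]
              · simp [stepA, hres, show ¬(r.2.2.1 + 1 = p) by have := hinv r hres; omega]
            rw [hstep]
            have hdecomp : rest = List.replicate (countDots rest) '.' ++ rest.drop (countDots rest) := by
              conv_lhs => rw [← List.take_append_drop (countDots rest) rest]
              rw [countDots_take]
            rw [show (PySem.List.enumerate rest (p + 1))
                  = PySem.List.enumerate (List.replicate (countDots rest) '.' ++ rest.drop (countDots rest)) (p + 1) by rw [← hdecomp]]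
            rw [extendRun]
            rw [show altGo index p ('.' :: rest)
                  = (p, index, p + (countDots rest : Int), index)
                      :: altGo index (p + (countDots rest : Int) + 1) (rest.drop (countDots rest)) by rw [altGo]; simp]
            cases hrest' : rest.drop (countDots rest) with
            | nil =>
                simp [altGo]
            | cons c' rest'' =>
                have hc' : c' ≠ '.' := countDots_drop_head rest c' rest'' hrest'
                rw [PySem.List.enumerate_cons, List.foldl_cons]
                rw [show stepA index (res ++ [(p, index, p + (countDots rest : Int), index)])
                      (p + 1 + (countDots rest : Int), c') = res ++ [(p, index, p + (countDots rest : Int), index)] by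
                      simp [stepA, hc']]
                have hlen'' : rest''.length ≤ n := by
                  have := congrArg List.length hdecomp
                  rw [hrest'] at this
                  simp at this
                  have := Nat.lt_succ_iff.mp (by simpa using hcs)
                  omega
                rw [ih rest'' hlen'' (p + 1 + (countDots rest : Int) + 1)
                      (res ++ [(p, index, p + (countDots rest : Int), index)])
                      (by intro r hr; simp at hr; rw [← hr]; simp)]
                rw [show altGo index (p + (countDots rest : Int) + 1) (c' :: rest'')
                      = altGo index (p + (countDots rest : Int) + 1 + 1) rest'' by rw [altGo]; simp [hc']]
                rw [show p + 1 + (countDots rest : Int) + 1 = p + (countDots rest : Int) + 1 + 1 by ring]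
                simp
          · rw [show stepA index res (p, c) = res by simp [stepA, hc]]
            rw [ih rest (Nat.lt_succ_iff.mp (by simpa using hcs)) (p + 1) res
                  (by intro r hr; have := hinv r hr; omega)]
            rw [show altGo index p (c :: rest) = altGo index (p + 1) rest by rw [altGo]; simp [hc]]

-- ===== VERDICT (by name: the statement is the Claim_ definition above) =====
theorem getVoids_spec : Claim_equal_getVoids := by
  intro index line _
  unfold Spec_getVoids getVoids getVoids_alt
  rcases h : line.toList with _ | ⟨c, rest⟩
  · simp [h, altGo]
  · have hlen : PySem.Str.len line > 0 := by simp [h]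
    simp only [hlen, if_pos]
    simpa using mainLemma index (c :: rest).length (c :: rest) le_rfl 0 [] (by simp)
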